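-- pv_equiv track=rewrite | github.com/Izzobacul/dev | code_wars/1_kyu/become_immortal.py | elder_age
-- ===== SOURCE A (Python) =====
-- def xor(a, b, l):
--     le = max(len((f"{a:b}")), len(f"{b:b}"))
--     a = f"{a:0{le}b}"
--     b = f"{b:0{le}b}"
--     x = ""
--     for i, d in enumerate(a):
--         if (d=='1' and b[i]=='0') or (b[i]=='1' and d=='0'):
--             x += '1'
--         else:
--             x += '0'
--     x = int(x, 2)
--     x = x-l if x-l>=0 else 0
--     return(x)
--
-- def elder_age(m,n,l,t):
--     worshippers = [[xor(i, j, l) for i in range(0, m)] for j in range(0, n)]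
--     s = 0
--     for l in worshippers:
--         s += sum(l)
--     if s>=t:
--         return(s-(t*(s//t)))
--     else:
--         return(s)
-- ===== SOURCE B (Python) =====
-- # Recursive power-of-two block decomposition using the self-similarity of XOR:
-- # sum of max(i^j - l, 0) over an m x n grid in O(log(max(m,n))) instead of O(m*n).
--
-- def _tri(h, l):
--     # sum of max(x - l, 0) for x in range(h)  (h >= 0)
--     if l >= h:
--         return 0
--     if l <= 0:
--         return h * (h - 1) // 2 - h * l
--     return (h - l - 1) * (h - l) // 2
--
-- def _solve(m, n, l):
--     # sum of max((i ^ j) - l, 0) over 0 <= i < m, 0 <= j < n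
--     if m <= 0 or n <= 0:
--         return 0
--     if m < n:
--         m, n = n, m
--     h = 1 << (m.bit_length() - 1)   # largest power of two <= m
--     if n <= h:
--         return n * _tri(h, l) + _solve(m - h, n, l - h)
--     return (h * _tri(h, l)
--             + (m - h + n - h) * _tri(h, l - h)
--             + _solve(m - h, n - h, l))
--
-- def elder_age(m, n, l, t):
--     return _solve(m, n, l) % t
-- ===== Notes on version B (the rewrite author's own statement) =====
-- stated objective: faster
-- what changed: Replaced the O(m*n) cell-by-cell grid sum (with string-based XOR) by a recursive power-of-two block decomposition exploiting XOR self-similarity, with a closed-form arithmetic series per block, plus a direct final modulo.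
import Mathlib
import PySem

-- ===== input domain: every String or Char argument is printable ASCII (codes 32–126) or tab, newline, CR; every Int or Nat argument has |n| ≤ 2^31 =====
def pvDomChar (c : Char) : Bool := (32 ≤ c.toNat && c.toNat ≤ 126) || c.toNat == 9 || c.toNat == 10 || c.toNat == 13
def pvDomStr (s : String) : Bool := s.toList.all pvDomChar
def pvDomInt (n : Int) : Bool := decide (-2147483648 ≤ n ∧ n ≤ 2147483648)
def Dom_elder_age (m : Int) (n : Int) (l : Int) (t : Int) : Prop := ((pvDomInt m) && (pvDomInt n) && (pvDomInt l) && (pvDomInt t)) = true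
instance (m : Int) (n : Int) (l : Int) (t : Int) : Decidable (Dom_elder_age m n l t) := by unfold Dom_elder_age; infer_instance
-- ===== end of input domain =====

-- B replaces A's O(m*n) cell-by-cell grid sum by a recursive power-of-two block
-- decomposition of the XOR grid with a closed-form arithmetic series per block (objective: faster).

-- ===== PORT A =====

-- binary digits of n, most significant first, empty for 0 (the recursion behind f"{n:b}");
-- the first argument is fuel making the halving recursion structural (n halvings always suffice)
def pvBitsAux : Nat → Nat → List Char
  | 0, _ => []
  | fuel + 1, n =>
    if n = 0 then [] else pvBitsAux fuel (n / 2) ++ [if n % 2 = 1 then '1' else '0']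

-- f"{n:b}" for n ≥ 0 (Python prints "0" for 0)
def pvBin (n : Nat) : List Char := if n = 0 then ['0'] else pvBitsAux n n

-- A's helper `xor`; exact for a, b ≥ 0, the only values elder_age passes (range values)
def pvXorHelper (a : Int) (b : Int) (l : Int) : Int :=
  let ba := pvBin a.toNat                               -- f"{a:b}"
  let bb := pvBin b.toNat                               -- f"{b:b}"
  let le := max ba.length bb.length
  let pa := List.replicate (le - ba.length) '0' ++ ba   -- f"{a:0{le}b}"
  let pb := List.replicate (le - bb.length) '0' ++ bb   -- f"{b:0{le}b}"
  -- the loop `for i, d in enumerate(a)` reading b[i]: pa and pb both have length le,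
  -- so walking them in lockstep via zip is exact
  let x := (pa.zip pb).map (fun p =>
    if (p.1 = '1' ∧ p.2 = '0') ∨ (p.2 = '1' ∧ p.1 = '0') then '1' else '0')
  -- int(x, 2): x is a nonempty string of '0'/'1' digits, so base-2 parsing is this fold
  let xv := x.foldl (fun acc c => 2 * acc + (if c = '1' then 1 else 0)) (0 : Int)
  if xv - l ≥ 0 then xv - l else 0

def elder_age (m : Int) (n : Int) (l : Int) (t : Int) : Int :=
  let worshippers := (PySem.List.pyRange 0 n 1).map (fun j =>
    (PySem.List.pyRange 0 m 1).map (fun i => pvXorHelper i j l))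
  let s := worshippers.foldl (fun s row => s + row.foldl (fun a x => a + x) 0) (0 : Int)
  if s ≥ t then s - t * PySem.Int.floordiv s t else s

-- ===== PORT B =====

-- _tri(h, l): sum of max(x - l, 0) for x in range(h)
def pvTri (h : Int) (l : Int) : Int :=
  if l ≥ h then 0
  else if l ≤ 0 then PySem.Int.floordiv (h * (h - 1)) 2 - h * l
  else PySem.Int.floordiv ((h - l - 1) * (h - l)) 2

-- _solve(m, n, l): recursive power-of-two block decomposition; the fuel argument makes the
-- recursion structural (each step shrinks m.toNat + n.toNat, so that much fuel always suffices)
def pvSolveGo : Nat → Int → Int → Int → Int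
  | 0, _, _, _ => 0
  | fuel + 1, m, n, l =>
    if m ≤ 0 ∨ n ≤ 0 then 0
    else
      let M := max m n                                      -- if m < n: m, n = n, m
      let N := min m n
      let H : Int := ((2 ^ Nat.log2 M.toNat : Nat) : Int)   -- 1 << (M.bit_length() - 1), M ≥ 1
      if N ≤ H then N * pvTri H l + pvSolveGo fuel (M - H) N (l - H)
      else H * pvTri H l + (M - H + N - H) * pvTri H (l - H) + pvSolveGo fuel (M - H) (N - H) l

def pvSolve (m : Int) (n : Int) (l : Int) : Int := pvSolveGo (m.toNat + n.toNat) m n l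

def elder_age_alt (m : Int) (n : Int) (l : Int) (t : Int) : Int :=
  PySem.Int.mod (pvSolve m n l) t

-- ===== PRECONDITION & SPEC =====
-- Pre_ excludes exactly t = 0, where A raises ZeroDivisionError (s ≥ 0 always holds, so s//t runs)
def Pre_elder_age (m : Int) (n : Int) (l : Int) (t : Int) : Prop := t ≠ 0
instance (m : Int) (n : Int) (l : Int) (t : Int) : Decidable (Pre_elder_age m n l t) := by
  unfold Pre_elder_age; infer_instance

def pvWitness_elder_age : Int × Int × Int × Int := (3, 4, 1, 7)

def Spec_elder_age (m : Int) (n : Int) (l : Int) (t : Int) (out : Int) : Prop := out = elder_age_alt m n l t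
instance (m : Int) (n : Int) (l : Int) (t : Int) (out : Int) : Decidable (Spec_elder_age m n l t out) := by unfold Spec_elder_age; infer_instance

-- ===== CLAIM (what is proved, stated in full; the proofs are below) =====
def Claim_equal_elder_age : Prop := ∀ (m : Int) (n : Int) (l : Int) (t : Int), Dom_elder_age m n l t → Pre_elder_age m n l t → Spec_elder_age m n l t (elder_age m n l t)

-- ===== LEMMAS AND PROOFS =====

-- ---- binary-string parsing (A's helper) ----

def pvBit (c : Char) : Nat := if c = '1' then 1 else 0

def pvVal (cs : List Char) : Nat := cs.foldl (fun acc c => 2 * acc + pvBit c) 0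

def pvIsBits (cs : List Char) : Prop := ∀ c ∈ cs, c = '0' ∨ c = '1'

lemma pvVal_aux (cs : List Char) : ∀ acc : Nat,
    cs.foldl (fun a c => 2 * a + pvBit c) acc = acc * 2 ^ cs.length + pvVal cs := by
  induction cs with
  | nil => intro acc; simp [pvVal]
  | cons c cs ih =>
    intro acc
    simp only [pvVal, List.foldl_cons, List.length_cons] at *
    rw [ih, ih (2 * 0 + pvBit c)]
    ring

lemma pvVal_cons (c : Char) (cs : List Char) :
    pvVal (c :: cs) = pvBit c * 2 ^ cs.length + pvVal cs := by
  simp only [pvVal, List.foldl_cons]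
  rw [pvVal_aux]
  simp [pvVal]

lemma pvVal_lt (cs : List Char) : pvVal cs < 2 ^ cs.length := by
  induction cs with
  | nil => simp [pvVal]
  | cons c cs ih =>
    have hb : pvBit c = 0 ∨ pvBit c = 1 := by unfold pvBit; split <;> simp
    rw [pvVal_cons, List.length_cons, pow_succ]
    rcases hb with hb | hb <;> rw [hb] <;> omega

lemma xor_block (L a b x y : Nat) (hx : x < 2 ^ L) (hy : y < 2 ^ L) :
    (2 ^ L * a + x) ^^^ (2 ^ L * b + y) = 2 ^ L * (a ^^^ b) + (x ^^^ y) := by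
  apply Nat.eq_of_testBit_eq
  intro i
  rw [Nat.testBit_xor, Nat.testBit_two_pow_mul_add a hx i, Nat.testBit_two_pow_mul_add b hy i,
      Nat.testBit_two_pow_mul_add (a ^^^ b) (Nat.xor_lt_two_pow hx hy) i]
  by_cases h : i < L <;> simp [h, Nat.testBit_xor]

lemma pvVal_zip : ∀ (as bs : List Char), as.length = bs.length → pvIsBits as → pvIsBits bs →
    pvVal ((as.zip bs).map (fun p =>
      if (p.1 = '1' ∧ p.2 = '0') ∨ (p.2 = '1' ∧ p.1 = '0') then '1' else '0'))
      = pvVal as ^^^ pvVal bs := by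
  intro as
  induction as with
  | nil =>
    intro bs hlen _ _
    cases bs with
    | nil => simp [pvVal]
    | cons b bs => simp at hlen
  | cons a as ih =>
    intro bs hlen hba hbb
    cases bs with
    | nil => simp at hlen
    | cons b bs =>
      simp only [List.length_cons, Nat.add_right_cancel_iff] at hlen
      have ha : a = '0' ∨ a = '1' := hba a (by simp)
      have hb : b = '0' ∨ b = '1' := hbb b (by simp)
      have hba' : pvIsBits as := fun c hc => hba c (by simp [hc])
      have hbb' : pvIsBits bs := fun c hc => hbb c (by simp [hc])
      simp only [List.zip_cons_cons, List.map_cons]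
      rw [pvVal_cons, pvVal_cons, pvVal_cons]
      simp only [List.length_map, List.length_zip, hlen, Nat.min_self]
      rw [ih bs hlen hba' hbb']
      have h1 : pvVal as < 2 ^ bs.length := hlen ▸ pvVal_lt as
      have h2 : pvVal bs < 2 ^ bs.length := pvVal_lt bs
      have hx := xor_block bs.length (pvBit a) (pvBit b) (pvVal as) (pvVal bs) h1 h2
      have hbit : pvBit (if (a = '1' ∧ b = '0') ∨ (b = '1' ∧ a = '0') then '1' else '0')
          = pvBit a ^^^ pvBit b := by
        rcases ha with rfl | rfl <;> rcases hb with rfl | rfl <;> decide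
      rw [hbit]
      rw [Nat.mul_comm (pvBit a) (2 ^ bs.length), Nat.mul_comm (pvBit b) (2 ^ bs.length),
          Nat.mul_comm (pvBit a ^^^ pvBit b) (2 ^ bs.length)]
      exact hx.symm

lemma pvIsBits_bitsAux (fuel n : Nat) : pvIsBits (pvBitsAux fuel n) := by
  induction fuel generalizing n with
  | zero => intro c hc; simp [pvBitsAux] at hc
  | succ fuel ih =>
    simp only [pvBitsAux]
    split
    · intro c hc; simp at hc
    · intro c hc
      rw [List.mem_append] at hc
      rcases hc with hc | hc
      · exact ih (n / 2) c hc
      · simp only [List.mem_singleton] at hc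
        subst hc
        split <;> simp

lemma pvVal_append_singleton (xs : List Char) (d : Char) :
    pvVal (xs ++ [d]) = 2 * pvVal xs + pvBit d := by
  simp only [pvVal, List.foldl_append, List.foldl_cons, List.foldl_nil]

lemma pvVal_bitsAux (fuel n : Nat) (hfn : n ≤ fuel) : pvVal (pvBitsAux fuel n) = n := by
  induction fuel generalizing n with
  | zero => simp [pvBitsAux, pvVal]; omega
  | succ fuel ih =>
    simp only [pvBitsAux]
    split
    · next h => simp [pvVal, h]
    · next h =>
      rw [pvVal_append_singleton, ih (n / 2) (by omega)]
      have hb : pvBit (if n % 2 = 1 then '1' else '0') = n % 2 := by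
        unfold pvBit
        rcases Nat.mod_two_eq_zero_or_one n with h2 | h2 <;> simp [h2]
      rw [hb]
      omega

lemma pvVal_bin (n : Nat) : pvVal (pvBin n) = n := by
  unfold pvBin
  split
  · next h => subst h; decide
  · exact pvVal_bitsAux n n le_rfl

lemma pvIsBits_bin (n : Nat) : pvIsBits (pvBin n) := by
  unfold pvBin
  split
  · intro c hc
    simp only [List.mem_singleton] at hc
    subst hc
    left; rfl
  · exact pvIsBits_bitsAux n n

lemma pvVal_pad (k : Nat) (cs : List Char) :
    pvVal (List.replicate k '0' ++ cs) = pvVal cs := by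
  induction k with
  | zero => simp
  | succ k ih =>
    rw [List.replicate_succ, List.cons_append]
    show List.foldl (fun acc c => 2 * acc + pvBit c) (2 * 0 + pvBit '0') _ = _
    rw [show (2 * 0 + pvBit '0' : Nat) = 0 by decide]
    exact ih

lemma pvIsBits_pad (k : Nat) (cs : List Char) (h : pvIsBits cs) :
    pvIsBits (List.replicate k '0' ++ cs) := by
  intro c hc
  rw [List.mem_append] at hc
  rcases hc with hc | hc
  · left; exact List.eq_of_mem_replicate hc
  · exact h c hc

lemma int_foldl_cast (cs : List Char) : ∀ acc : Nat,
    cs.foldl (fun acc c => 2 * acc + (if c = '1' then 1 else 0)) (acc : Int)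
      = ((cs.foldl (fun a c => 2 * a + pvBit c) acc : Nat) : Int) := by
  induction cs with
  | nil => intro acc; simp
  | cons c cs ih =>
    intro acc
    simp only [List.foldl_cons]
    have h1 : (2 * (acc : Int) + (if c = '1' then 1 else 0))
        = ((2 * acc + pvBit c : Nat) : Int) := by
      unfold pvBit; split <;> push_cast <;> ring
    rw [h1, ih]

lemma pvXorHelper_eq (a b l : Int) :
    pvXorHelper a b l = max ((((a.toNat ^^^ b.toNat : Nat)) : Int) - l) 0 := by
  unfold pvXorHelper
  simp only []
  set ba := pvBin a.toNat with hba
  set bb := pvBin b.toNat with hbb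
  set le := max ba.length bb.length with hle
  set pa := List.replicate (le - ba.length) '0' ++ ba with hpa
  set pb := List.replicate (le - bb.length) '0' ++ bb with hpb
  have hlpa : pa.length = le := by
    rw [hpa]; simp only [List.length_append, List.length_replicate]; omega
  have hlpb : pb.length = le := by
    rw [hpb]; simp only [List.length_append, List.length_replicate]; omega
  have hcast := int_foldl_cast ((pa.zip pb).map (fun p =>
      if (p.1 = '1' ∧ p.2 = '0') ∨ (p.2 = '1' ∧ p.1 = '0') then '1' else '0')) 0
  rw [Nat.cast_zero] at hcast
  rw [hcast]
  have hz := pvVal_zip pa pb (hlpa.trans hlpb.symm)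
      (pvIsBits_pad _ _ (pvIsBits_bin _)) (pvIsBits_pad _ _ (pvIsBits_bin _))
  have hva : pvVal pa = a.toNat := by rw [hpa, pvVal_pad, hba, pvVal_bin]
  have hvb : pvVal pb = b.toNat := by rw [hpb, pvVal_pad, hbb, pvVal_bin]
  rw [show ∀ x : List Char, x.foldl (fun a c => 2 * a + pvBit c) 0 = pvVal x from fun _ => rfl]
  rw [hz, hva, hvb]
  split <;> omega

-- ---- A's double loop as a Finset double sum ----

def gridSum (M N : Nat) (l : Int) : Int :=
  ∑ j ∈ Finset.range N, ∑ i ∈ Finset.range M, max ((((i ^^^ j : Nat)) : Int) - l) 0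

lemma sum_map_range (f : Nat → Int) (n : Nat) :
    ((List.range n).map f).sum = ∑ i ∈ Finset.range n, f i := by
  induction n with
  | zero => simp
  | succ n ih => rw [List.range_succ, Finset.sum_range_succ]; simp [ih]

lemma list_foldl_add (xs : List Int) : ∀ acc : Int,
    xs.foldl (fun a x => a + x) acc = acc + xs.sum := by
  induction xs with
  | nil => intro acc; simp
  | cons x xs ih =>
    intro acc
    simp only [List.foldl_cons, List.sum_cons]
    rw [ih]
    ring

lemma rows_sum (R C : Nat) (F : Nat → Nat → Int) :
    ((List.range R).map (fun j => (List.range C).map (fun i => F i j))).foldl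
      (fun s row => s + row.foldl (fun a x => a + x) 0) 0
      = ∑ j ∈ Finset.range R, ∑ i ∈ Finset.range C, F i j := by
  induction R with
  | zero => simp
  | succ R ih =>
    simp only [List.range_succ, List.map_append, List.map_cons, List.map_nil,
      List.foldl_append, List.foldl_cons, List.foldl_nil]
    rw [ih, Finset.sum_range_succ, list_foldl_add, sum_map_range]
    simp

lemma elder_age_eq (m n l t : Int) :
    elder_age m n l t =
      (if gridSum m.toNat n.toNat l ≥ t
        then gridSum m.toNat n.toNat l - t * PySem.Int.floordiv (gridSum m.toNat n.toNat l) t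
        else gridSum m.toNat n.toNat l) := by
  unfold elder_age
  simp only []
  rw [PySem.List.pyRange_one 0 n, PySem.List.pyRange_one 0 m]
  simp only [Int.sub_zero, List.map_map, Function.comp_def, zero_add]
  rw [rows_sum n.toNat m.toNat (fun i j => pvXorHelper ((i : Nat) : Int) ((j : Nat) : Int) l)]
  have hS : (∑ j ∈ Finset.range n.toNat, ∑ i ∈ Finset.range m.toNat,
      pvXorHelper ((i : Nat) : Int) ((j : Nat) : Int) l) = gridSum m.toNat n.toNat l := by
    unfold gridSum
    apply Finset.sum_congr rfl
    intro j _
    apply Finset.sum_congr rfl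
    intro i _
    rw [pvXorHelper_eq]
    simp
  rw [hS]

lemma gridSum_nonneg (M N : Nat) (l : Int) : 0 ≤ gridSum M N l := by
  apply Finset.sum_nonneg
  intro j _
  apply Finset.sum_nonneg
  intro i _
  exact le_max_right _ _

lemma final_mod (s t : Int) (ht : t ≠ 0) (hs : 0 ≤ s) :
    (if s ≥ t then s - t * PySem.Int.floordiv s t else s) = PySem.Int.mod s t := by
  have key := PySem.Int.floordiv_mul_add_mod s t
  split
  · linear_combination -key
  · rename_i h
    have htpos : 0 < t := by omega
    rw [PySem.Int.mod_eq_emod_of_pos htpos]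
    rw [Int.emod_eq_of_lt hs (by omega)]

-- ---- the block decomposition ----

lemma gauss_int (d : Nat) :
    ∑ x ∈ Finset.range d, (x : Int) = ((d * (d - 1) / 2 : Nat) : Int) := by
  rw [← Nat.cast_sum, Finset.sum_range_id]

lemma fd_cast (u : Nat) :
    PySem.Int.floordiv ((u : Nat) : Int) 2 = ((u / 2 : Nat) : Int) := by
  exact_mod_cast PySem.Int.floordiv_natCast u 2

lemma prod_pred_cast (d : Nat) (hd : 1 ≤ d) :
    ((d : Int)) * ((d : Int) - 1) = (((d * (d - 1)) : Nat) : Int) := by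
  rw [Nat.cast_mul, Nat.cast_sub hd, Nat.cast_one]

lemma fd_half (h : Nat) :
    PySem.Int.floordiv ((h : Int) * ((h : Int) - 1)) 2 = ((h * (h - 1) / 2 : Nat) : Int) := by
  cases h with
  | zero => decide
  | succ d => rw [prod_pred_cast (d + 1) (by omega), fd_cast]

lemma tri_sum (h : Nat) (l : Int) :
    ∑ x ∈ Finset.range h, max ((x : Int) - l) 0 = pvTri (h : Int) l := by
  unfold pvTri
  by_cases h1 : l ≥ (h : Int)
  · rw [if_pos h1]
    apply Finset.sum_eq_zero
    intro x hx
    rw [Finset.mem_range] at hx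
    have hx' : (x : Int) < (h : Int) := by exact_mod_cast hx
    exact max_eq_right (by omega)
  · rw [if_neg h1]
    by_cases h2 : l ≤ 0
    · rw [if_pos h2]
      have hc : ∀ x ∈ Finset.range h, max ((x : Int) - l) 0 = (x : Int) - l := by
        intro x _
        exact max_eq_left (by omega)
      rw [Finset.sum_congr rfl hc, Finset.sum_sub_distrib, Finset.sum_const,
          Finset.card_range, nsmul_eq_mul, gauss_int, fd_half]
    · rw [if_neg h2]
      have hl0 : 0 < l := by omega
      have hlh : l < (h : Int) := by omega
      set L := l.toNat with hLdef
      have hlL : (L : Int) = l := Int.toNat_of_nonneg hl0.le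
      have hLh : L < h := by omega
      have hr : Finset.range h = Finset.range (L + (h - L)) := by
        rw [Nat.add_sub_cancel' hLh.le]
      rw [hr, Finset.sum_range_add]
      have hz : ∑ x ∈ Finset.range L, max ((x : Int) - l) 0 = 0 := by
        apply Finset.sum_eq_zero
        intro x hx
        rw [Finset.mem_range] at hx
        have : (x : Int) < (L : Int) := by exact_mod_cast hx
        exact max_eq_right (by omega)
      have hs : ∀ x ∈ Finset.range (h - L), max (((L + x : Nat) : Int) - l) 0 = (x : Int) := by
        intro x _
        have e : ((L + x : Nat) : Int) - l = (x : Int) := by push_cast; omega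
        rw [e]
        exact max_eq_left (by omega)
      rw [hz, Finset.sum_congr rfl hs, zero_add, gauss_int]
      have hd1 : 1 ≤ h - L := by omega
      have e1 : (h : Int) - l = ((h - L : Nat) : Int) := by
        rw [Nat.cast_sub hLh.le, hlL]
      rw [e1]
      rw [show ((h - L : Nat) : Int) - 1 = (((h - L) - 1 : Nat) : Int) by
        rw [Nat.cast_sub hd1, Nat.cast_one]]
      rw [show ((((h - L) - 1 : Nat)) : Int) * ((h - L : Nat) : Int)
          = ((((h - L) - 1) * (h - L) : Nat) : Int) by push_cast; ring]
      rw [fd_cast]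
      congr 1
      rw [Nat.mul_comm]

lemma sum_range_xor (k j : Nat) (hj : j < 2 ^ k) (f : Nat → Int) :
    ∑ i ∈ Finset.range (2 ^ k), f (i ^^^ j) = ∑ i ∈ Finset.range (2 ^ k), f i := by
  refine Finset.sum_nbij' (fun i => i ^^^ j) (fun i => i ^^^ j) ?_ ?_ ?_ ?_ ?_
  · intro a ha
    rw [Finset.mem_range] at *
    exact Nat.xor_lt_two_pow ha hj
  · intro a ha
    rw [Finset.mem_range] at *
    exact Nat.xor_lt_two_pow ha hj
  · intro a _; exact Nat.xor_xor_cancel_right a j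
  · intro a _; exact Nat.xor_xor_cancel_right a j
  · intro a _; rfl

lemma xor_high (k i j : Nat) (hi : i < 2 ^ k) (hj : j < 2 ^ k) :
    (2 ^ k + i) ^^^ j = 2 ^ k + (i ^^^ j) := by
  have h := xor_block k 1 0 i j hi hj
  simpa using h

lemma xor_high_high (k i j : Nat) (hi : i < 2 ^ k) (hj : j < 2 ^ k) :
    (2 ^ k + i) ^^^ (2 ^ k + j) = i ^^^ j := by
  have h := xor_block k 1 1 i j hi hj
  simpa using h

lemma sum_range_xor_max (k j : Nat) (hj : j < 2 ^ k) (l : Int) :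
    ∑ i ∈ Finset.range (2 ^ k), max ((((i ^^^ j : Nat)) : Int) - l) 0
      = ∑ i ∈ Finset.range (2 ^ k), max ((i : Int) - l) 0 :=
  sum_range_xor k j hj (fun v => max ((v : Int) - l) 0)

lemma grid_decomp_low (k Mr Nn : Nat) (l : Int) (hMr : Mr < 2 ^ k) (hNn : Nn ≤ 2 ^ k) :
    gridSum (2 ^ k + Mr) Nn l
      = (Nn : Int) * pvTri ((2 ^ k : Nat) : Int) l
        + gridSum Mr Nn (l - ((2 ^ k : Nat) : Int)) := by
  unfold gridSum
  have step : ∀ j ∈ Finset.range Nn,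
      (∑ i ∈ Finset.range (2 ^ k + Mr), max ((((i ^^^ j : Nat)) : Int) - l) 0)
        = pvTri ((2 ^ k : Nat) : Int) l
          + ∑ x ∈ Finset.range Mr,
              max ((((x ^^^ j : Nat)) : Int) - (l - ((2 ^ k : Nat) : Int))) 0 := by
    intro j hj
    rw [Finset.mem_range] at hj
    have hj2 : j < 2 ^ k := lt_of_lt_of_le hj hNn
    rw [Finset.sum_range_add]
    congr 1
    · rw [sum_range_xor_max k j hj2 l, tri_sum]
    · apply Finset.sum_congr rfl
      intro x hx
      rw [Finset.mem_range] at hx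
      rw [xor_high k x j (lt_trans hx hMr) hj2]
      congr 1
      push_cast
      ring
  rw [Finset.sum_congr rfl step, Finset.sum_add_distrib, Finset.sum_const, Finset.card_range,
      nsmul_eq_mul]

lemma grid_decomp_high (k Mr Nr : Nat) (l : Int) (hMr : Mr < 2 ^ k) (hNr : Nr < 2 ^ k) :
    gridSum (2 ^ k + Mr) (2 ^ k + Nr) l
      = ((2 ^ k : Nat) : Int) * pvTri ((2 ^ k : Nat) : Int) l
        + ((Mr : Int) + (Nr : Int)) * pvTri ((2 ^ k : Nat) : Int) (l - ((2 ^ k : Nat) : Int))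
        + gridSum Mr Nr l := by
  set l' := l - ((2 ^ k : Nat) : Int) with hl'
  have row_full : ∀ j, j < 2 ^ k →
      (∑ i ∈ Finset.range (2 ^ k), max ((((i ^^^ j : Nat)) : Int) - l) 0)
        = pvTri ((2 ^ k : Nat) : Int) l := by
    intro j hj
    rw [sum_range_xor_max k j hj l, tri_sum]
  have row_full' : ∀ j, j < 2 ^ k →
      (∑ i ∈ Finset.range (2 ^ k), max ((((i ^^^ j : Nat)) : Int) - l') 0)
        = pvTri ((2 ^ k : Nat) : Int) l' := by
    intro j hj
    rw [sum_range_xor_max k j hj l', tri_sum]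
  unfold gridSum
  rw [Finset.sum_range_add]
  have partA : (∑ j ∈ Finset.range (2 ^ k),
        ∑ i ∈ Finset.range (2 ^ k + Mr), max ((((i ^^^ j : Nat)) : Int) - l) 0)
      = ((2 ^ k : Nat) : Int) * pvTri ((2 ^ k : Nat) : Int) l
        + (Mr : Int) * pvTri ((2 ^ k : Nat) : Int) l' := by
    have e1 : ∀ j ∈ Finset.range (2 ^ k),
        (∑ i ∈ Finset.range (2 ^ k + Mr), max ((((i ^^^ j : Nat)) : Int) - l) 0)
          = pvTri ((2 ^ k : Nat) : Int) l
            + ∑ x ∈ Finset.range Mr, max ((((x ^^^ j : Nat)) : Int) - l') 0 := by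
      intro j hj
      rw [Finset.mem_range] at hj
      rw [Finset.sum_range_add]
      congr 1
      · exact row_full j hj
      · apply Finset.sum_congr rfl
        intro x hx
        rw [Finset.mem_range] at hx
        rw [xor_high k x j (lt_trans hx hMr) hj]
        congr 1
        rw [hl']
        push_cast
        ring
    rw [Finset.sum_congr rfl e1, Finset.sum_add_distrib, Finset.sum_const, Finset.card_range,
        nsmul_eq_mul]
    congr 1
    rw [Finset.sum_comm]
    have e2 : ∀ x ∈ Finset.range Mr,
        (∑ j ∈ Finset.range (2 ^ k), max ((((x ^^^ j : Nat)) : Int) - l') 0)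
          = pvTri ((2 ^ k : Nat) : Int) l' := by
      intro x hx
      rw [Finset.mem_range] at hx
      have hc : ∀ j ∈ Finset.range (2 ^ k),
          max ((((x ^^^ j : Nat)) : Int) - l') 0 = max ((((j ^^^ x : Nat)) : Int) - l') 0 := by
        intro j _
        rw [Nat.xor_comm]
      rw [Finset.sum_congr rfl hc]
      exact row_full' x (lt_trans hx hMr)
    rw [Finset.sum_congr rfl e2, Finset.sum_const, Finset.card_range, nsmul_eq_mul]
  have partB : (∑ y ∈ Finset.range Nr,
        ∑ i ∈ Finset.range (2 ^ k + Mr), max ((((i ^^^ (2 ^ k + y) : Nat)) : Int) - l) 0)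
      = (Nr : Int) * pvTri ((2 ^ k : Nat) : Int) l' + gridSum Mr Nr l := by
    have e1 : ∀ y ∈ Finset.range Nr,
        (∑ i ∈ Finset.range (2 ^ k + Mr), max ((((i ^^^ (2 ^ k + y) : Nat)) : Int) - l) 0)
          = pvTri ((2 ^ k : Nat) : Int) l'
            + ∑ x ∈ Finset.range Mr, max ((((x ^^^ y : Nat)) : Int) - l) 0 := by
      intro y hy
      rw [Finset.mem_range] at hy
      have hy2 : y < 2 ^ k := lt_trans hy hNr
      rw [Finset.sum_range_add]
      congr 1
      · have hc : ∀ i ∈ Finset.range (2 ^ k),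
            max ((((i ^^^ (2 ^ k + y) : Nat)) : Int) - l) 0
              = max ((((i ^^^ y : Nat)) : Int) - l') 0 := by
          intro i hi
          rw [Finset.mem_range] at hi
          rw [Nat.xor_comm i (2 ^ k + y), xor_high k y i hy2 hi, Nat.xor_comm y i]
          congr 1
          rw [hl']
          push_cast
          ring
        rw [Finset.sum_congr rfl hc]
        exact row_full' y hy2
      · apply Finset.sum_congr rfl
        intro x hx
        rw [Finset.mem_range] at hx
        rw [xor_high_high k x y (lt_trans hx hMr) hy2]
    rw [Finset.sum_congr rfl e1, Finset.sum_add_distrib, Finset.sum_const, Finset.card_range,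
        nsmul_eq_mul]
    rfl
  rw [partA, partB]
  unfold gridSum
  ring

lemma gridSum_comm (M N : Nat) (l : Int) : gridSum M N l = gridSum N M l := by
  unfold gridSum
  rw [Finset.sum_comm]
  apply Finset.sum_congr rfl
  intro j _
  apply Finset.sum_congr rfl
  intro i _
  rw [Nat.xor_comm]

lemma gridSum_max_min (M N : Nat) (l : Int) :
    gridSum M N l = gridSum (max M N) (min M N) l := by
  rcases le_total N M with h | h
  · rw [Nat.max_eq_left h, Nat.min_eq_right h]
  · rw [Nat.max_eq_right h, Nat.min_eq_left h, gridSum_comm]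

lemma solve_eq : ∀ (S M N : Nat) (l : Int), M + N ≤ S →
    pvSolveGo S (M : Int) (N : Int) l = gridSum M N l := by
  intro S
  induction S with
  | zero =>
    intro M N l hMN
    have hM : M = 0 := by omega
    subst hM
    simp [pvSolveGo, gridSum]
  | succ S ih =>
    intro M N l hMN
    by_cases hM0 : M = 0
    · subst hM0
      simp [pvSolveGo, gridSum]
    by_cases hN0 : N = 0
    · subst hN0
      simp [pvSolveGo, gridSum]
    have hcond : ¬((M : Int) ≤ 0 ∨ (N : Int) ≤ 0) := by omega
    simp only [pvSolveGo]
    rw [if_neg hcond, gridSum_max_min M N l]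
    set Mn := max M N with hMn
    set Nn := min M N with hNn
    have hmax : max ((M : Nat) : Int) ((N : Nat) : Int) = ((Mn : Nat) : Int) := by
      rw [hMn]; exact_mod_cast (Nat.cast_max M N).symm
    have hmin : min ((M : Nat) : Int) ((N : Nat) : Int) = ((Nn : Nat) : Int) := by
      rw [hNn]; exact_mod_cast (Nat.cast_min M N).symm
    rw [hmax, hmin, Int.toNat_natCast]
    set k := Nat.log2 Mn with hk
    set K := 2 ^ k with hK
    have hMn0 : Mn ≠ 0 := by omega
    have hKM : K ≤ Mn := by rw [hK, hk]; exact Nat.log2_self_le hMn0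
    have hMK : Mn < 2 * K := by
      have h2 := Nat.lt_log2_self (n := Mn)
      rw [pow_succ] at h2
      rw [hK, hk]
      omega
    have hK1 : 1 ≤ K := by rw [hK]; exact Nat.one_le_two_pow
    have hNM : Nn ≤ Mn := by omega
    by_cases hbr : Nn ≤ K
    · rw [if_pos (show ((Nn : Nat) : Int) ≤ ((K : Nat) : Int) by exact_mod_cast hbr)]
      have hc : ((Mn : Nat) : Int) - ((K : Nat) : Int) = ((Mn - K : Nat) : Int) :=
        (Nat.cast_sub hKM).symm
      rw [hc, ih (Mn - K) Nn (l - ((K : Nat) : Int)) (by omega)]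
      have e1 : Mn = K + (Mn - K) := by omega
      calc ((Nn : Nat) : Int) * pvTri ((K : Nat) : Int) l
            + gridSum (Mn - K) Nn (l - ((K : Nat) : Int))
          = gridSum (K + (Mn - K)) Nn l := by
            rw [hK]
            exact (grid_decomp_low k (Mn - K) Nn l (by omega) (by omega)).symm
        _ = gridSum Mn Nn l := by rw [← e1]
    · rw [if_neg (show ¬((Nn : Nat) : Int) ≤ ((K : Nat) : Int) by exact_mod_cast hbr)]
      have hKN : K ≤ Nn := by omega
      have hcM : ((Mn : Nat) : Int) - ((K : Nat) : Int) = ((Mn - K : Nat) : Int) :=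
        (Nat.cast_sub hKM).symm
      have hcN : ((Nn : Nat) : Int) - ((K : Nat) : Int) = ((Nn - K : Nat) : Int) :=
        (Nat.cast_sub hKN).symm
      rw [hcM, hcN, ih (Mn - K) (Nn - K) l (by omega)]
      rw [show ((Mn - K : Nat) : Int) + ((Nn : Nat) : Int) - ((K : Nat) : Int)
          = ((Mn - K : Nat) : Int) + ((Nn - K : Nat) : Int) by omega]
      have e1 : Mn = K + (Mn - K) := by omega
      have e2 : Nn = K + (Nn - K) := by omega
      calc ((K : Nat) : Int) * pvTri ((K : Nat) : Int) l
            + (((Mn - K : Nat) : Int) + ((Nn - K : Nat) : Int))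
              * pvTri ((K : Nat) : Int) (l - ((K : Nat) : Int))
            + gridSum (Mn - K) (Nn - K) l
          = gridSum (K + (Mn - K)) (K + (Nn - K)) l := by
            rw [hK]
            exact (grid_decomp_high k (Mn - K) (Nn - K) l (by omega) (by omega)).symm
        _ = gridSum Mn Nn l := by rw [← e1, ← e2]


-- ===== VERDICT (by name: the statement is the Claim_ definition above) =====
theorem elder_age_spec : Claim_equal_elder_age := by
  intro m n l t _ hpre
  unfold Spec_elder_age elder_age_alt
  rw [elder_age_eq, final_mod _ t hpre (gridSum_nonneg _ _ _)]
  congr 1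
  by_cases h : m ≤ 0 ∨ n ≤ 0
  · unfold pvSolve
    have hz : pvSolveGo (m.toNat + n.toNat) m n l = 0 := by
      cases m.toNat + n.toNat with
      | zero => simp [pvSolveGo]
      | succ f =>
        simp only [pvSolveGo]
        rw [if_pos h]
    rw [hz]
    rcases h with h | h
    · rw [show m.toNat = 0 by omega]
      simp [gridSum]
    · rw [show n.toNat = 0 by omega]
      simp [gridSum]
  · have h1 : 0 < m := by omega
    have h2 : 0 < n := by omega
    have hm : ((m.toNat : Nat) : Int) = m := Int.toNat_of_nonneg h1.le
    have hn : ((n.toNat : Nat) : Int) = n := Int.toNat_of_nonneg h2.le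
    calc gridSum m.toNat n.toNat l
        = pvSolveGo (m.toNat + n.toNat) ((m.toNat : Nat) : Int) ((n.toNat : Nat) : Int) l :=
          (solve_eq (m.toNat + n.toNat) _ _ l le_rfl).symm
      _ = pvSolve m n l := by unfold pvSolve; rw [hm, hn]
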